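-- pv_equiv track=rewrite | github.com/StranikS-Scan/WorldOfTanks-Decompiled | source/res/scripts/common/dossiers2/common/updater_utils.py | getNewBinarySetBlockValues
-- ===== SOURCE A (Python) =====
-- def getNewBinarySetBlockValues(layout, values):
--     blockValues = []
--     bit = 0
--     byte = 0
--     for name in layout:
--         bit += 1
--         byte >>= 1
--         byte |= 128 if bool(values.get(name, 0)) else 0
--         if bit == 8:
--             blockValues.append(byte)
--             bit = 0
--             byte = 0
--
--     if bit > 0:
--         byte >>= 8 - bit
--         blockValues.append(byte)
--     while len(blockValues) > 0 and blockValues[-1] == 0: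
--         blockValues.pop()
--
--     blockFormat = '<%dB' % len(blockValues)
--     return (blockFormat, blockValues)
-- ===== SOURCE B (Python) =====
-- def getNewBinarySetBlockValues(layout, values):
--     bytes_ = [sum(1 << j for j, name in enumerate(layout[i:i + 8]) if bool(values.get(name, 0)))
--               for i in range(0, len(layout), 8)]
--     k = len(bytes_)
--     while k > 0 and bytes_[k - 1] == 0:
--         k -= 1
--     blockValues = bytes_[:k]
--     return ('<%dB' % k, blockValues)
-- ===== Notes on version B (the rewrite author's own statement) =====
-- stated objective: idiomatic
-- what changed: Replaces A's rolling shift-register (shift right, OR 128 into the top bit, flush every 8 names, partial-byte shift correction) with a two-level chunk-then-reduce: partition the layout into chunks of 8 and compute each byte directly as an LSB-first sum of powers of two, then trim by computing the index of the last nonzero byte instead of popping in place.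
import Mathlib
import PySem

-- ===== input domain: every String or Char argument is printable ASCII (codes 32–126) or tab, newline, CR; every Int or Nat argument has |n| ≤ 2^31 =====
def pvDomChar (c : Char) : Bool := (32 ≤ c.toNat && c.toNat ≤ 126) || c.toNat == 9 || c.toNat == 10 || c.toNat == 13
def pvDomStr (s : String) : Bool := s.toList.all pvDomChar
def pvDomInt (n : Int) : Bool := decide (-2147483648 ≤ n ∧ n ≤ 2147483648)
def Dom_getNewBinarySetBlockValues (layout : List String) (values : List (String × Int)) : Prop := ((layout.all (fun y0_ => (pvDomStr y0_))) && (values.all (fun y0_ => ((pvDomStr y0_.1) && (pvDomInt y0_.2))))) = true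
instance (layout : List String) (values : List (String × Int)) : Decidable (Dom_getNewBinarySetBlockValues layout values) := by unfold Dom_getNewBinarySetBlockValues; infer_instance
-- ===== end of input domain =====

-- B replaces A's rolling shift-register with chunk-of-8 grouping: each byte is computed
-- directly as an LSB-first sum of powers of two over its chunk (objective: idiomatic).

-- ===== PORT A =====
-- the body of A's `for name in layout` loop, on state (blockValues, bit, byte)
def pvStepA (values : List (String × Int)) (st : List Int × Int × Int) (name : String) : List Int × Int × Int :=
  let bit := st.2.1 + 1
  let byte := st.2.2 >>> (1 : Nat)                    -- byte >>= 1
  let byte := PySem.Int.bor byte (if PySem.Dict.getD (PySem.Dict.ofList values) name (0 : Int) ≠ 0 then 128 else 0)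
  if bit = 8 then (st.1 ++ [byte], 0, 0) else (st.1, bit, byte)

-- A's `while len(blockValues) > 0 and blockValues[-1] == 0: blockValues.pop()`
def pvTrimA (bs : List Int) : List Int :=
  if bs.getLast? = some 0 then pvTrimA bs.dropLast else bs
termination_by bs.length
decreasing_by cases bs with
  | nil => simp_all
  | cons a l => simp [List.length_dropLast]

def getNewBinarySetBlockValues (layout : List String) (values : List (String × Int)) : String × List Int :=
  let s := layout.foldl (pvStepA values) ([], 0, 0)
  -- `if bit > 0: byte >>= 8 - bit; blockValues.append(byte)`; here 0 < s.2.1 ≤ 8 so .toNat is exact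
  let blockValues := if s.2.1 > 0 then s.1 ++ [s.2.2 >>> (8 - s.2.1).toNat] else s.1
  let blockValues := pvTrimA blockValues
  ("<" ++ PySem.Int.toStr (blockValues.length : Int) ++ "B", blockValues)

-- ===== PORT B =====
-- `sum(1 << j for j, name in enumerate(chunk) if bool(values.get(name, 0)))`; j ≥ 0 so .toNat is exact
def pvChunkByte (values : List (String × Int)) (chunk : List String) : Int :=
  (PySem.List.enumerate chunk).foldl
    (fun acc p => if PySem.Dict.getD (PySem.Dict.ofList values) p.2 (0 : Int) ≠ 0 then acc + ((1 : Int) <<< p.1.toNat) else acc) 0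

-- `while k > 0 and bytes_[k - 1] == 0: k -= 1`
def pvTrimLen (bs : List Int) (k : Nat) : Nat :=
  if 0 < k ∧ PySem.List.pyGet? bs ((k : Int) - 1) = some 0 then pvTrimLen bs (k - 1) else k

def getNewBinarySetBlockValues_alt (layout : List String) (values : List (String × Int)) : String × List Int :=
  let bytes_ := (PySem.List.pyRange 0 (layout.length : Int) 8).map
    (fun i => pvChunkByte values (PySem.List.slice layout (some i) (some (i + 8))))
  let k := pvTrimLen bytes_ bytes_.length
  let blockValues := PySem.List.slice bytes_ none (some (k : Int))   -- bytes_[:k]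
  ("<" ++ PySem.Int.toStr (k : Int) ++ "B", blockValues)

-- ===== PRECONDITION & SPEC =====
def Spec_getNewBinarySetBlockValues (layout : List String) (values : List (String × Int)) (out : String × List Int) : Prop := out = getNewBinarySetBlockValues_alt layout values
instance (layout : List String) (values : List (String × Int)) (out : String × List Int) : Decidable (Spec_getNewBinarySetBlockValues layout values out) := by unfold Spec_getNewBinarySetBlockValues; infer_instance

-- ===== CLAIM (what is proved, stated in full; the proofs are below) =====
def Claim_equal_getNewBinarySetBlockValues : Prop := ∀ (layout : List String) (values : List (String × Int)), Dom_getNewBinarySetBlockValues layout values → Spec_getNewBinarySetBlockValues layout values (getNewBinarySetBlockValues layout values)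

-- ===== LEMMAS AND PROOFS =====

-- the flag contributed by one layout name
def pvFlag (values : List (String × Int)) (name : String) : Int :=
  if PySem.Dict.getD (PySem.Dict.ofList values) name (0 : Int) ≠ 0 then 1 else 0

-- LSB-first value of a chunk of flags
def pvVal (values : List (String × Int)) : List String → Int
  | [] => 0
  | n :: c => pvFlag values n + 2 * pvVal values c

-- the byte list both programs build before trimming
def pvBytesOf (values : List (String × Int)) (l : List String) : List Int :=
  if l = [] then [] else pvVal values (l.take 8) :: pvBytesOf values (l.drop 8)
termination_by l.length
decreasing_by cases l with
  | nil => simp_all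
  | cons a t => simp

theorem pvVal_nonneg (values : List (String × Int)) (c : List String) : 0 ≤ pvVal values c := by
  induction c with
  | nil => simp [pvVal]
  | cons n c ih => simp only [pvVal, pvFlag]; split <;> omega

theorem pvChunkByte_foldl (values : List (String × Int)) (c : List String) :
    ∀ (s : Nat) (acc : Int),
      (PySem.List.enumerate c (s : Int)).foldl
        (fun acc p => if PySem.Dict.getD (PySem.Dict.ofList values) p.2 (0 : Int) ≠ 0 then acc + ((1 : Int) <<< p.1.toNat) else acc) acc
      = acc + 2 ^ s * pvVal values c := by
  induction c with
  | nil => intro s acc; simp [PySem.List.enumerate_nil, pvVal]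
  | cons n c ih =>
    intro s acc
    rw [PySem.List.enumerate_cons]
    simp only [List.foldl_cons]
    have : ((s : Int) + 1) = ((s + 1 : Nat) : Int) := by push_cast; ring
    rw [this, ih (s + 1)]
    simp only [pvVal, Int.toNat_natCast, pvFlag]
    split
    · rw [Int.one_shiftLeft]; push_cast; ring
    · ring

theorem pvChunkByte_eq (values : List (String × Int)) (c : List String) :
    pvChunkByte values c = pvVal values c := by
  have h := pvChunkByte_foldl values c 0 0
  simpa [pvChunkByte] using h

-- A's loop over one chunk, with the shift-register invariant byte = b * 2^(8-t), 0 ≤ b < 2^t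
theorem pvBor_zero (x : Int) (h0 : 0 ≤ x) : PySem.Int.bor x 0 = x := by
  obtain ⟨m, rfl⟩ := Int.eq_ofNat_of_zero_le h0
  rw [show (0 : Int) = ((0 : Nat) : Int) from rfl, PySem.Int.bor_natCast]
  simp

theorem pvBor_128 (x : Int) (h0 : 0 ≤ x) (h : x < 128) : PySem.Int.bor x 128 = x + 128 := by
  obtain ⟨m, rfl⟩ := Int.eq_ofNat_of_zero_le h0
  have hm : m < 128 := by exact_mod_cast h
  rw [show (128 : Int) = ((128 : Nat) : Int) from rfl, PySem.Int.bor_natCast]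
  have h2 : m ||| 128 = m + 128 := by
    have h3 := Nat.shiftLeft_add_eq_or_of_lt (i := 7) (b := m) (by omega) 1
    rw [show (1 : Nat) <<< 7 = 128 from rfl, Nat.lor_comm] at h3
    omega
  rw [h2]; push_cast; ring

theorem pvShiftA (b : Int) (t : Nat) (ht : t < 8) :
    (b * 2 ^ (8 - t)) >>> (1 : Nat) = b * 2 ^ (7 - t) := by
  rw [Int.shiftRight_eq_div_pow]
  rw [show (8 - t) = (7 - t) + 1 from by omega, pow_succ, ← mul_assoc]
  norm_num

theorem pvStepA_chunk (values : List (String × Int)) (c : List String) :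
    ∀ (t : Nat) (acc : List Int) (b : Int), t + c.length ≤ 8 → t < 8 → 0 ≤ b → b < 2 ^ t →
      c.foldl (pvStepA values) (acc, (t : Int), b * 2 ^ (8 - t))
      = if t + c.length = 8 then (acc ++ [b + 2 ^ t * pvVal values c], 0, 0)
        else (acc, ((t + c.length : Nat) : Int), (b + 2 ^ t * pvVal values c) * 2 ^ (8 - t - c.length)) := by
  induction c with
  | nil =>
    intro t acc b hle hlt hb0 hb1
    simp only [List.foldl_nil, List.length_nil, Nat.add_zero, pvVal]
    rw [if_neg (by omega)]
    norm_num
  | cons x c ih =>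
    intro t acc b hle hlt hb0 hb1
    simp only [List.foldl_cons, List.length_cons]
    have hblt : b * 2 ^ (7 - t) < 128 := by
      calc b * 2 ^ (7 - t) < 2 ^ t * 2 ^ (7 - t) :=
              mul_lt_mul_of_pos_right hb1 (by positivity)
        _ = 2 ^ (t + (7 - t)) := (pow_add 2 t (7 - t)).symm
        _ ≤ 2 ^ 7 := by apply pow_le_pow_right₀ (by norm_num); omega
        _ = 128 := by norm_num
    have hb0' : 0 ≤ b * 2 ^ (7 - t) := by positivity
    have hstep : pvStepA values (acc, (t : Int), b * 2 ^ (8 - t)) x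
        = if (t : Int) + 1 = 8 then (acc ++ [b + pvFlag values x * 2 ^ t], 0, 0)
          else (acc, (t : Int) + 1, (b + pvFlag values x * 2 ^ t) * 2 ^ (8 - (t + 1))) := by
      unfold pvStepA pvFlag
      simp only [pvShiftA b t hlt]
      by_cases hf : PySem.Dict.getD (PySem.Dict.ofList values) x (0 : Int) ≠ 0
      · rw [if_pos hf, if_pos hf, pvBor_128 _ hb0' hblt]
        have hbyte : b * 2 ^ (7 - t) + 128 = (b + 1 * 2 ^ t) * 2 ^ (8 - (t + 1)) := by
          rw [show (8 - (t + 1)) = 7 - t from by omega, add_mul, one_mul,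
              ← pow_add, show t + (7 - t) = 7 from by omega]
          norm_num
        by_cases h8 : (t : Int) + 1 = 8
        · have ht7 : t = 7 := by omega
          rw [if_pos h8]
          subst ht7
          norm_num
        · rw [if_neg h8, if_neg h8, hbyte]
      · rw [if_neg hf, if_neg hf, pvBor_zero _ hb0']
        have hbyte : b * 2 ^ (7 - t) = (b + 0 * 2 ^ t) * 2 ^ (8 - (t + 1)) := by
          rw [show (8 - (t + 1)) = 7 - t from by omega]
          ring
        by_cases h8 : (t : Int) + 1 = 8
        · have ht7 : t = 7 := by omega
          rw [if_pos h8]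
          subst ht7
          norm_num
        · rw [if_neg h8, if_neg h8, hbyte]
    rw [hstep]
    have hflag0 : 0 ≤ pvFlag values x := by unfold pvFlag; split <;> norm_num
    have hflag1 : pvFlag values x ≤ 1 := by unfold pvFlag; split <;> norm_num
    by_cases h8 : (t : Int) + 1 = 8
    · have ht7 : t = 7 := by omega
      have hc0 : c.length = 0 := by simp only [List.length_cons] at hle; omega
      have hc : c = [] := List.eq_nil_of_length_eq_zero hc0
      subst ht7; subst hc
      rw [if_pos h8, List.foldl_nil, if_pos (by norm_num)]
      simp only [pvVal, Prod.mk.injEq, and_true]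
      rw [show b + 2 ^ 7 * (pvFlag values x + 2 * 0) = b + pvFlag values x * 2 ^ 7 from by ring]
    · rw [if_neg h8]
      have h8' : t + 1 < 8 := by omega
      have hle' : t + 1 + c.length ≤ 8 := by
        have := hle; simp only [List.length_cons] at this; omega
      have hfl : pvFlag values x * 2 ^ t ≤ 1 * 2 ^ t :=
        mul_le_mul_of_nonneg_right hflag1 (by positivity)
      have hfl0 : 0 ≤ pvFlag values x * 2 ^ t :=
        mul_nonneg hflag0 (by positivity)
      have := ih (t + 1) acc (b + pvFlag values x * 2 ^ t) hle' h8'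
        (by linarith) (by rw [pow_succ]; linarith)
      rw [show ((t : Int) + 1) = ((t + 1 : Nat) : Int) from by push_cast; ring, this]
      by_cases hfull : t + 1 + c.length = 8
      · rw [if_pos hfull, if_pos (by omega)]
        simp only [pvVal, Prod.mk.injEq, and_true]
        rw [show b + 2 ^ t * (pvFlag values x + 2 * pvVal values c)
              = b + pvFlag values x * 2 ^ t + 2 ^ (t + 1) * pvVal values c from by ring]
      · rw [if_neg hfull, if_neg (by omega)]
        simp only [pvVal, Prod.mk.injEq, true_and]
        refine ⟨by omega, ?_⟩
        rw [show (8 - (t + 1) - c.length) = 8 - t - (c.length + 1) from by omega]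
        ring

theorem pvShiftExact (v : Int) (k : Nat) (_hv : 0 ≤ v) : (v * 2 ^ k) >>> k = v := by
  rw [Int.shiftRight_eq_div_pow]
  push_cast
  exact Int.mul_ediv_cancel _ (by positivity)

-- A's loop + partial-byte finalization computes pvBytesOf
theorem pvLoopA_eq (values : List (String × Int)) (l : List String) : ∀ (acc : List Int),
    (fun s : List Int × Int × Int =>
        if s.2.1 > 0 then s.1 ++ [s.2.2 >>> (8 - s.2.1).toNat] else s.1)
      (l.foldl (pvStepA values) (acc, 0, 0))
    = acc ++ pvBytesOf values l := by
  suffices h : ∀ (n : Nat) (l : List String) (acc : List Int), l.length = n →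
      (fun s : List Int × Int × Int =>
        if s.2.1 > 0 then s.1 ++ [s.2.2 >>> (8 - s.2.1).toNat] else s.1)
        (l.foldl (pvStepA values) (acc, 0, 0))
      = acc ++ pvBytesOf values l by
    exact fun acc => h l.length l acc rfl
  intro n
  induction n using Nat.strong_induction_on with
  | _ n ih =>
    intro l acc hn
    by_cases hnil : l = []
    · subst hnil
      rw [pvBytesOf]
      simp
    · have hlen : 0 < l.length := by
        cases l with
        | nil => exact absurd rfl hnil
        | cons a t => simp
      conv_lhs => rw [← List.take_append_drop 8 l, List.foldl_append]
      have hc := pvStepA_chunk values (l.take 8) 0 acc 0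
        (by simp only [Nat.zero_add, List.length_take]; omega) (by norm_num) le_rfl (by norm_num)
      norm_num at hc
      by_cases h8 : 8 ≤ l.length
      · rw [if_pos h8] at hc
        rw [hc]
        rw [ih (l.drop 8).length (by rw [List.length_drop]; omega) (l.drop 8)
              (acc ++ [pvVal values (l.take 8)]) rfl]
        have hBytes : pvBytesOf values l
            = pvVal values (l.take 8) :: pvBytesOf values (l.drop 8) := by
          rw [pvBytesOf, if_neg hnil]
        rw [hBytes]
        simp [List.append_assoc]
      · rw [if_neg h8] at hc
        rw [show min (8 : Int) (l.length : Int) = (l.length : Int) from by omega,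
            show min 8 l.length = l.length from by omega] at hc
        rw [hc]
        have hdrop : l.drop 8 = [] := List.drop_eq_nil_of_le (by omega)
        rw [hdrop, List.foldl_nil]
        simp only
        rw [if_pos (by exact_mod_cast hlen)]
        have htn : ((8 : Int) - (l.length : Int)).toNat = 8 - l.length := by omega
        rw [htn, pvShiftExact _ _ (pvVal_nonneg values (l.take 8))]
        have hBytes : pvBytesOf values l = [pvVal values (l.take 8)] := by
          rw [pvBytesOf, if_neg hnil, hdrop, pvBytesOf]
          simp
        rw [hBytes]

-- helper for B: the comprehension indices as Nat
theorem pvBytesOf_range (values : List (String × Int)) :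
    ∀ (n : Nat) (l : List String), l.length = n →
      (List.range ((l.length + 7) / 8)).map (fun k => pvVal values ((l.drop (8 * k)).take 8))
      = pvBytesOf values l := by
  intro n
  induction n using Nat.strong_induction_on with
  | _ n ih =>
    intro l hn
    by_cases hnil : l = []
    · subst hnil; simp [pvBytesOf]
    · have hlen : 0 < l.length := by
        cases l with
        | nil => exact absurd rfl hnil
        | cons a t => simp
      have hm : (l.length + 7) / 8 = ((l.drop 8).length + 7) / 8 + 1 := by
        rw [List.length_drop]; omega
      rw [pvBytesOf, if_neg hnil, hm, List.range_succ_eq_map]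
      simp only [List.map_cons, List.map_map]
      refine congrArg₂ List.cons (by norm_num) ?_
      rw [← ih (l.drop 8).length (by rw [List.length_drop]; omega) (l.drop 8) rfl]
      apply List.map_congr_left
      intro k _
      simp only [Function.comp_apply]
      congr 1
      rw [show 8 * (k + 1) = 8 + 8 * k from by ring, ← List.drop_drop]

-- B's comprehension over range(0, len, 8) computes pvBytesOf
theorem pvBytesB_eq (values : List (String × Int)) (l : List String) :
    (PySem.List.pyRange 0 (l.length : Int) 8).map
      (fun i => pvChunkByte values (PySem.List.slice l (some i) (some (i + 8))))
    = pvBytesOf values l := by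
  rw [PySem.List.pyRange_of_pos 0 (l.length : Int) (s := 8) (by norm_num)]
  by_cases hnil : l = []
  · subst hnil
    norm_num
    rw [pvBytesOf]
    simp
  · have hlen : 0 < l.length := by
      cases l with
      | nil => exact absurd rfl hnil
      | cons a t => simp
    rw [if_pos (by exact_mod_cast hlen)]
    have hcount : (((l.length : Int) - 0 + 8 - 1) / 8).toNat = (l.length + 7) / 8 := by
      omega
    rw [hcount, ← pvBytesOf_range values l.length l rfl, List.map_map]
    apply List.map_congr_left
    intro k _
    simp only [Function.comp_apply]
    have e1 : (0 : Int) + 8 * (k : Int) = ((8 * k : Nat) : Int) := by push_cast; ring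
    have e2 : ((8 * k : Nat) : Int) + 8 = ((8 * k : Nat) : Int) + ((8 : Nat) : Int) := by
      norm_num
    rw [e1, e2, PySem.List.slice_natCast_add, pvChunkByte_eq]

-- both trims compute "drop trailing zeros"
theorem pvTrimA_eq (bs : List Int) :
    pvTrimA bs = ((bs.reverse.dropWhile (fun b => b == 0)).reverse : List Int) := by
  induction bs using List.reverseRecOn with
  | nil => rw [pvTrimA]; simp
  | append_singleton ys y ih =>
    rw [pvTrimA, List.getLast?_concat]
    by_cases hy : y = 0
    · subst hy
      rw [if_pos rfl, List.dropLast_concat, ih, List.reverse_append]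
      simp
    · rw [if_neg (by simp [hy]), List.reverse_append]
      simp [hy]

theorem pvTrimLen_le (bs : List Int) (k : Nat) : pvTrimLen bs k ≤ k := by
  fun_induction pvTrimLen bs k <;> omega

theorem pvTrimLen_append (ys zs : List Int) :
    ∀ (k : Nat), k ≤ ys.length → pvTrimLen (ys ++ zs) k = pvTrimLen ys k := by
  intro k
  induction k with
  | zero =>
    intro _
    conv_lhs => rw [pvTrimLen]
    conv_rhs => rw [pvTrimLen]
    norm_num
  | succ k ih =>
    intro hk
    conv_lhs => rw [pvTrimLen]
    conv_rhs => rw [pvTrimLen]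
    have e1 : ((k + 1 : Nat) : Int) - 1 = ((k : Nat) : Int) := by push_cast; ring
    have hidx : PySem.List.pyGet? (ys ++ zs) (((k + 1 : Nat) : Int) - 1)
        = PySem.List.pyGet? ys (((k + 1 : Nat) : Int) - 1) := by
      rw [e1, PySem.List.pyGet?_natCast, PySem.List.pyGet?_natCast,
          List.getElem?_append_left (by omega)]
    rw [hidx]
    split
    · simp only [Nat.add_sub_cancel]
      exact ih (by omega)
    · rfl

theorem pvTrimB_eq (bs : List Int) :
    bs.take (pvTrimLen bs bs.length) = ((bs.reverse.dropWhile (fun b => b == 0)).reverse : List Int) := by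
  induction bs using List.reverseRecOn with
  | nil => simp
  | append_singleton ys y ih =>
    have hlen : (ys ++ [y]).length = ys.length + 1 := by simp
    rw [hlen]
    conv_lhs => rw [pvTrimLen]
    have e1 : ((ys.length + 1 : Nat) : Int) - 1 = ((ys.length : Nat) : Int) := by push_cast; ring
    have hget : PySem.List.pyGet? (ys ++ [y]) (((ys.length + 1 : Nat) : Int) - 1) = some y := by
      rw [e1, PySem.List.pyGet?_natCast, List.getElem?_append_right (le_refl _)]
      simp
    rw [hget]
    by_cases hy : y = 0
    · subst hy
      rw [if_pos ⟨by omega, rfl⟩]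
      simp only [Nat.add_sub_cancel]
      rw [pvTrimLen_append ys [0] ys.length (le_refl _),
          List.take_append_of_le_length (pvTrimLen_le ys ys.length), ih,
          List.reverse_append]
      simp
    · rw [if_neg (by simp [hy]), List.take_of_length_le (by simp), List.reverse_append]
      simp [hy]

-- ===== VERDICT (by name: the statement is the Claim_ definition above) =====
theorem getNewBinarySetBlockValues_spec : Claim_equal_getNewBinarySetBlockValues := by
  intro layout values _
  unfold Spec_getNewBinarySetBlockValues getNewBinarySetBlockValues getNewBinarySetBlockValues_alt
  simp only [pvBytesB_eq, pvLoopA_eq values layout [], List.nil_append]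
  rw [PySem.List.slice_to_natCast]
  have hk : pvTrimLen (pvBytesOf values layout) (pvBytesOf values layout).length
      = (((pvBytesOf values layout).reverse.dropWhile (fun b => b == 0)).reverse).length := by
    rw [← pvTrimB_eq, List.length_take]
    exact (min_eq_left (pvTrimLen_le _ _)).symm
  rw [pvTrimA_eq, pvTrimB_eq, hk]
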